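-- pv_equiv track=rewrite | github.com/VaHiX/CodeForces | Python/ByRound/1864/1864_E_Guess_Game.py | f
-- ===== SOURCE A (Python) =====
-- def f(a, b):
--     """
--     Calculates the number of turns needed to determine the relationship between a and b
--     based on the bitwise OR operation and the value of a OR b.
--     Returns the number of turns.
--
--     Args:
--         a (int): Value of a (from s[i_a])
--         b (int): Value of b (from s[i_b])
--
--     Returns:
--         int: Number of turns.
--     """
--     cnt = 0
--     for i in range(30, -1, -1):  # From most significant bit to least
--         if a & (1 << i) == b & (1 << i) != 0:
--             cnt += 1
--         elif a & (1 << i) != b & (1 << i):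
--             break
--     return cnt
-- ===== SOURCE B (Python) =====
-- def f(a, b):
--     mask = (1 << 31) - 1
--     x = (a ^ b) & mask
--     if x == 0:
--         return bin(a & mask).count('1')
--     h = x.bit_length() - 1
--     return bin((a & mask) >> (h + 1)).count('1')
-- ===== Notes on version B (the rewrite author's own statement) =====
-- stated objective: simpler
-- what changed: Replaces the 31-step descending bit loop (with break at the first differing bit) by a closed-form bit computation: mask both operands to 31 bits, locate the highest differing bit with bit_length on the XOR, and return the popcount of a's bits strictly above it (full popcount when the masked values are equal).
import Mathlib
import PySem

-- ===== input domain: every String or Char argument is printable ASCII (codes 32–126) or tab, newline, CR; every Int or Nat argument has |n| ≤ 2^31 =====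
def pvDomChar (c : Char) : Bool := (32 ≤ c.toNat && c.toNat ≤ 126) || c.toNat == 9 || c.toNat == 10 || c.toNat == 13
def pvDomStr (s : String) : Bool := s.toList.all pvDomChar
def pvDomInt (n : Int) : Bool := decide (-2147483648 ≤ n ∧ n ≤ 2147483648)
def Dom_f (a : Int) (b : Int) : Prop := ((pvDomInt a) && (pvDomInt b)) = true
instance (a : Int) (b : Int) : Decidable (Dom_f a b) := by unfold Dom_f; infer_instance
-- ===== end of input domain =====

-- B replaces A's 31-step descending bit loop (break at the first differing bit) by a
-- closed-form computation: xor, highest differing bit via bit_length, popcount of the prefix.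

-- ===== PORT A =====
-- the for-loop over range(30, -1, -1) with its break, carrying cnt
def fLoop (a b : Int) : List Int → Int → Int
  | [], cnt => cnt
  | i :: rest, cnt =>
    if Int.land a (1 <<< i) = Int.land b (1 <<< i) ∧ ¬ Int.land b (1 <<< i) = 0 then
      fLoop a b rest (cnt + 1)
    else if ¬ Int.land a (1 <<< i) = Int.land b (1 <<< i) then cnt
    else fLoop a b rest cnt

def f (a : Int) (b : Int) : Int := fLoop a b (PySem.List.pyRange 30 (-1) (-1)) 0

-- ===== PORT B =====
-- popc n = bin(n).count('1')
def popc (n : Nat) : Nat :=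
  if h : n = 0 then 0 else n % 2 + popc (n / 2)
decreasing_by exact Nat.div_lt_self (Nat.pos_of_ne_zero h) (by norm_num)

def f_alt (a : Int) (b : Int) : Int :=
  let mask : Int := 2147483647          -- (1 << 31) - 1
  let x : Int := Int.land (Int.xor a b) mask
  if x = 0 then (popc (Int.land a mask).toNat : Int)
  else
    -- h = x.bit_length() - 1 = Nat.log2 x.toNat (x > 0 here)
    let h : Nat := Nat.log2 x.toNat
    (popc ((Int.land a mask).toNat >>> (h + 1)) : Int)

-- ===== PRECONDITION & SPEC =====
def Spec_f (a : Int) (b : Int) (out : Int) : Prop := out = f_alt a b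
instance (a : Int) (b : Int) (out : Int) : Decidable (Spec_f a b out) := by unfold Spec_f; infer_instance

-- ===== CLAIM (what is proved, stated in full; the proofs are below) =====
def Claim_equal_f : Prop := ∀ (a : Int) (b : Int), Dom_f a b → Spec_f a b (f a b)

-- ===== LEMMAS AND PROOFS =====

-- the descending index list [k-1, …, 0]
def descList : Nat → List Int
  | 0 => []
  | k + 1 => ((k : Nat) : Int) :: descList k

-- A's loop as a function of the test bits, from bit k-1 down
def G (a b : Int) : Nat → Int
  | 0 => 0
  | k + 1 =>
    if a.testBit k = b.testBit k then (if b.testBit k then 1 else 0) + G a b k else 0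

-- Nat-level version of G
def GN (A B : Nat) : Nat → Nat
  | 0 => 0
  | k + 1 =>
    if A.testBit k = B.testBit k then (if B.testBit k then 1 else 0) + GN A B k else 0

theorem popc_zero : popc 0 = 0 := by rw [popc]; simp

theorem popc_eq (n : Nat) : popc n = n % 2 + popc (n / 2) := by
  by_cases h : n = 0
  · subst h; norm_num [popc_zero]
  · rw [popc]; simp [h]

theorem popc_two_pow_add : ∀ (k r : Nat), r < 2 ^ k → popc (2 ^ k + r) = popc r + 1 := by
  intro k
  induction k with
  | zero =>
    intro r hr
    interval_cases r
    have h1 : (2 : Nat) ^ 0 + 0 = 1 := rfl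
    rw [h1, popc_eq 1]
    norm_num [popc_zero]
  | succ k ih =>
    intro r hr
    have h2 : (2 ^ (k + 1) + r) / 2 = 2 ^ k + r / 2 := by
      rw [pow_succ]; omega
    have h1 : (2 ^ (k + 1) + r) % 2 = r % 2 := by
      rw [pow_succ]; omega
    rw [popc_eq (2 ^ (k + 1) + r), h1, h2, ih (r / 2) (by rw [pow_succ] at hr; omega),
      popc_eq r]
    ring

theorem land_pow (a : Int) (i : Nat) :
    Int.land a (Int.ofNat (2 ^ i)) = if a.testBit i then Int.ofNat (2 ^ i) else 0 := by
  cases a with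
  | ofNat m =>
    show Int.ofNat (m &&& 2 ^ i) = _
    rw [Nat.and_two_pow]
    cases h : m.testBit i <;> simp [Int.testBit, h]
  | negSucc m =>
    show Int.ofNat (Nat.ldiff (2 ^ i) m) = _
    have hld : Nat.ldiff (2 ^ i) m = if m.testBit i then 0 else 2 ^ i := by
      apply Nat.eq_of_testBit_eq
      intro j
      cases h : m.testBit i <;>
        simp [Nat.testBit_ldiff, Nat.testBit_two_pow] <;>
        · intro hj; subst hj; simp [h]
    rw [hld]
    cases h : m.testBit i <;> simp [Int.testBit, h]

theorem fLoop_cons (a b : Int) (i : Nat) (rest : List Int) (cnt : Int) :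
    fLoop a b (((i : Nat) : Int) :: rest) cnt =
      if a.testBit i = b.testBit i then
        (if b.testBit i then fLoop a b rest (cnt + 1) else fLoop a b rest cnt)
      else cnt := by
  have hp : ((1 : Int) <<< ((i : Nat) : Int)) = Int.ofNat (2 ^ i) := Int.one_shiftLeft i
  have hpow : (Int.ofNat (2 ^ i)) ≠ 0 := by
    simp
  show (if Int.land a (1 <<< ((i : Nat) : Int)) = Int.land b (1 <<< ((i : Nat) : Int)) ∧
          ¬ Int.land b (1 <<< ((i : Nat) : Int)) = 0 then fLoop a b rest (cnt + 1)
        else if ¬ Int.land a (1 <<< ((i : Nat) : Int)) = Int.land b (1 <<< ((i : Nat) : Int)) then cnt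
        else fLoop a b rest cnt) = _
  rw [hp, land_pow a i, land_pow b i]
  have hpow' : (0 : Int) ≠ 2 ^ i := (by positivity : (0 : Int) < 2 ^ i).ne
  cases ha : a.testBit i <;> cases hb : b.testBit i <;>
    simp [hpow', hpow'.symm]

theorem fLoop_desc (a b : Int) : ∀ (k : Nat) (cnt : Int),
    fLoop a b (descList k) cnt = cnt + G a b k := by
  intro k
  induction k with
  | zero => intro cnt; simp [descList, fLoop, G]
  | succ k ih =>
    intro cnt
    rw [descList, fLoop_cons, G]
    by_cases hab : a.testBit k = b.testBit k
    · cases hb : b.testBit k <;> simp [hab, hb, ih] <;> ring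
    · simp [hab]

theorem pyRange_desc : PySem.List.pyRange 30 (-1) (-1) = descList 31 := by decide

theorem f_eq_G (a b : Int) : f a b = G a b 31 := by
  rw [f, pyRange_desc, fLoop_desc]
  ring

theorem land_ofNat_exists (a : Int) (M : Nat) :
    ∃ m : Nat, Int.land a (Int.ofNat M) = Int.ofNat m := by
  cases a with
  | ofNat m => exact ⟨_, rfl⟩
  | negSucc m => exact ⟨_, rfl⟩

theorem toNat_land_testBit (a : Int) (M : Nat) (j : Nat) :
    ((Int.land a (Int.ofNat M)).toNat).testBit j = (a.testBit j && M.testBit j) := by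
  cases a with
  | ofNat m =>
    show ((m &&& M) : Nat).testBit j = _
    rw [Nat.testBit_land]; rfl
  | negSucc m =>
    show (Nat.ldiff M m).testBit j = _
    rw [Nat.testBit_ldiff]
    show _ = (!m.testBit j && M.testBit j)
    rw [Bool.and_comm]

theorem mask_eq : (2147483647 : Int) = Int.ofNat (2 ^ 31 - 1) := by norm_num

theorem x_toNat (a b : Int) :
    (Int.land (Int.xor a b) (Int.ofNat (2 ^ 31 - 1))).toNat =
      (Int.land a (Int.ofNat (2 ^ 31 - 1))).toNat ^^^
        (Int.land b (Int.ofNat (2 ^ 31 - 1))).toNat := by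
  apply Nat.eq_of_testBit_eq
  intro j
  rw [Nat.testBit_xor, toNat_land_testBit, toNat_land_testBit, toNat_land_testBit,
    Int.testBit_lxor]
  cases a.testBit j <;> cases b.testBit j <;> cases ((2 ^ 31 - 1 : Nat)).testBit j <;> decide

theorem low_bits (a : Int) (i : Nat) (hi : i < 31) :
    ((Int.land a (Int.ofNat (2 ^ 31 - 1))).toNat).testBit i = a.testBit i := by
  rw [toNat_land_testBit, Nat.testBit_two_pow_sub_one]
  simp [hi]

theorem G_eq_GN (a b : Int) (A B : Nat)
    (hA : ∀ i, i < 31 → A.testBit i = a.testBit i)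
    (hB : ∀ i, i < 31 → B.testBit i = b.testBit i) :
    ∀ k, k ≤ 31 → G a b k = (GN A B k : Int) := by
  intro k
  induction k with
  | zero => intro _; simp [G, GN]
  | succ k ih =>
    intro hk
    rw [G, GN, hA k (by omega), hB k (by omega)]
    by_cases hab : a.testBit k = b.testBit k <;>
      cases hb : b.testBit k <;>
      simp_all [ih (by omega)]

theorem shift_split (k h r : Nat) (hh : h + 1 ≤ k) :
    (2 ^ k + r) >>> (h + 1) = 2 ^ (k - h - 1) + r >>> (h + 1) := by
  have hsplit : (2 : Nat) ^ k = 2 ^ (k - h - 1) * 2 ^ (h + 1) := by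
    rw [← pow_add]; congr 1; omega
  rw [Nat.shiftRight_eq_div_pow, Nat.shiftRight_eq_div_pow, hsplit, Nat.add_comm,
    Nat.add_mul_div_right _ _ (Nat.two_pow_pos _), Nat.add_comm]

theorem shift_lt (k h r : Nat) (hh : h + 1 ≤ k) (hr : r < 2 ^ k) :
    r >>> (h + 1) < 2 ^ (k - h - 1) := by
  have hsplit : (2 : Nat) ^ k = 2 ^ (k - h - 1) * 2 ^ (h + 1) := by
    rw [← pow_add]; congr 1; omega
  rw [Nat.shiftRight_eq_div_pow]
  exact (Nat.div_lt_iff_lt_mul (Nat.two_pow_pos _)).mpr (hsplit ▸ hr)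

theorem mod_two_pow_succ (X k : Nat) :
    X % 2 ^ (k + 1) = (if X.testBit k then 2 ^ k else 0) + X % 2 ^ k := by
  have h := Nat.mod_mul (a := 2 ^ k) (b := 2) (x := X)
  rw [pow_succ, h, Nat.testBit_eq_decide_div_mod_eq]
  have h01 : X / 2 ^ k % 2 = 0 ∨ X / 2 ^ k % 2 = 1 := by omega
  rcases h01 with h1 | h1 <;> simp [h1] <;> omega

theorem GN_closed : ∀ (k A B : Nat),
    GN A B k =
      if A % 2 ^ k = B % 2 ^ k then popc (A % 2 ^ k)
      else popc ((A % 2 ^ k) >>> (Nat.log2 ((A % 2 ^ k) ^^^ (B % 2 ^ k)) + 1)) := by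
  intro k
  induction k with
  | zero => intro A B; simp [GN, Nat.mod_one, popc_zero]
  | succ k ih =>
    intro A B
    rw [GN]
    have ih' := ih A B
    have ha'lt : A % 2 ^ k < 2 ^ k := Nat.mod_lt _ (Nat.two_pow_pos k)
    have hb'lt : B % 2 ^ k < 2 ^ k := Nat.mod_lt _ (Nat.two_pow_pos k)
    have haa := mod_two_pow_succ A k
    have hbb := mod_two_pow_succ B k
    by_cases hab : A.testBit k = B.testBit k
    · rw [if_pos hab]
      have hX : (A % 2 ^ (k + 1)) ^^^ (B % 2 ^ (k + 1)) = (A % 2 ^ k) ^^^ (B % 2 ^ k) := by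
        apply Nat.eq_of_testBit_eq
        intro j
        rw [Nat.testBit_xor, Nat.testBit_xor, Nat.testBit_mod_two_pow,
          Nat.testBit_mod_two_pow, Nat.testBit_mod_two_pow, Nat.testBit_mod_two_pow]
        by_cases hjk : j < k
        · simp [hjk, show j < k + 1 by omega]
        · by_cases hjk1 : j < k + 1
          · have hj : j = k := by omega
            subst hj
            simp [hab]
          · simp [hjk, hjk1]
      cases hBk : B.testBit k with
      | false =>
        have hAk : A.testBit k = false := by rw [hab, hBk]
        rw [hAk] at haa; rw [hBk] at hbb
        simp only [if_neg Bool.false_ne_true, Nat.zero_add] at haa hbb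
        rw [haa, hbb] at hX ⊢
        rw [ih']
        simp
      | true =>
        have hAk : A.testBit k = true := by rw [hab, hBk]
        rw [hAk] at haa; rw [hBk] at hbb
        simp only [if_pos] at haa hbb
        rw [haa, hbb] at hX ⊢
        rw [ih', hX, if_pos (show true = true from rfl)]
        have hcond : (2 ^ k + A % 2 ^ k = 2 ^ k + B % 2 ^ k) ↔ (A % 2 ^ k = B % 2 ^ k) := by
          omega
        by_cases h' : A % 2 ^ k = B % 2 ^ k
        · rw [if_pos h', if_pos (hcond.mpr h'), popc_two_pow_add k _ ha'lt]
          omega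
        · rw [if_neg h', if_neg (fun hc => h' (hcond.mp hc))]
          have hX0 : (A % 2 ^ k) ^^^ (B % 2 ^ k) ≠ 0 := by
            simpa [Nat.xor_eq_zero_iff] using h'
          have hXlt : (A % 2 ^ k) ^^^ (B % 2 ^ k) < 2 ^ k := Nat.xor_lt_two_pow ha'lt hb'lt
          set hL := Nat.log2 ((A % 2 ^ k) ^^^ (B % 2 ^ k)) with hLdef
          have hhk : hL + 1 ≤ k := by
            have := (Nat.log2_lt hX0).mpr hXlt
            omega
          have hshift := shift_split k hL (A % 2 ^ k) hhk
          have hlt := shift_lt k hL (A % 2 ^ k) hhk ha'lt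
          rw [hshift, popc_two_pow_add _ _ hlt]
          omega
    · rw [if_neg hab]
      have hne : ¬ (A % 2 ^ (k + 1) = B % 2 ^ (k + 1)) := by
        intro h
        apply hab
        have hbit := congrArg (fun t => t.testBit k) h
        simpa [Nat.testBit_mod_two_pow] using hbit
      rw [if_neg hne]
      have hXk : ((A % 2 ^ (k + 1)) ^^^ (B % 2 ^ (k + 1))).testBit k = true := by
        rw [Nat.testBit_xor, Nat.testBit_mod_two_pow, Nat.testBit_mod_two_pow]
        cases hA : A.testBit k <;> cases hB : B.testBit k <;> simp_all
      have hX0 : (A % 2 ^ (k + 1)) ^^^ (B % 2 ^ (k + 1)) ≠ 0 := by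
        intro h
        rw [h, Nat.zero_testBit] at hXk
        cases hXk
      have hXlt : (A % 2 ^ (k + 1)) ^^^ (B % 2 ^ (k + 1)) < 2 ^ (k + 1) :=
        Nat.xor_lt_two_pow (Nat.mod_lt _ (Nat.two_pow_pos _)) (Nat.mod_lt _ (Nat.two_pow_pos _))
      have hlog : Nat.log2 ((A % 2 ^ (k + 1)) ^^^ (B % 2 ^ (k + 1))) = k := by
        have h1 : Nat.log2 ((A % 2 ^ (k + 1)) ^^^ (B % 2 ^ (k + 1))) < k + 1 :=
          (Nat.log2_lt hX0).mpr hXlt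
        have h2 : ¬ Nat.log2 ((A % 2 ^ (k + 1)) ^^^ (B % 2 ^ (k + 1))) < k := by
          intro h
          have hsmall := (Nat.log2_lt hX0).mp h
          have := Nat.testBit_lt_two_pow hsmall
          rw [hXk] at this
          cases this
        omega
      rw [hlog]
      have hz : (A % 2 ^ (k + 1)) >>> (k + 1) = 0 := by
        rw [Nat.shiftRight_eq_div_pow]
        exact Nat.div_eq_of_lt (Nat.mod_lt _ (Nat.two_pow_pos _))
      rw [hz, popc_zero]

theorem f_alt_eq (a b : Int) :
    f_alt a b =
      (GN (Int.land a (Int.ofNat (2 ^ 31 - 1))).toNat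
          (Int.land b (Int.ofNat (2 ^ 31 - 1))).toNat 31 : Int) := by
  simp only [f_alt]
  rw [mask_eq]
  obtain ⟨x', hx⟩ := land_ofNat_exists (Int.xor a b) (2 ^ 31 - 1)
  rw [hx]
  have hx' : x' = (Int.land a (Int.ofNat (2 ^ 31 - 1))).toNat ^^^
      (Int.land b (Int.ofNat (2 ^ 31 - 1))).toNat := by
    have h := x_toNat a b
    rw [hx] at h
    simpa using h
  have hmod : ∀ c : Int, (Int.land c (Int.ofNat (2 ^ 31 - 1))).toNat % 2 ^ 31 =
      (Int.land c (Int.ofNat (2 ^ 31 - 1))).toNat := by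
    intro c
    apply Nat.eq_of_testBit_eq
    intro j
    rw [Nat.testBit_mod_two_pow, toNat_land_testBit]
    by_cases hj : j < 31
    · simp [hj]
    · have h1 : Nat.testBit 2147483647 j = false := by
        rw [show (2147483647 : Nat) = 2 ^ 31 - 1 by norm_num, Nat.testBit_two_pow_sub_one]
        simpa using hj
      simp [hj, h1]
  have h31 := GN_closed 31 (Int.land a (Int.ofNat (2 ^ 31 - 1))).toNat
    (Int.land b (Int.ofNat (2 ^ 31 - 1))).toNat
  rw [hmod a, hmod b] at h31
  by_cases h0 : x' = 0
  · have hAB : (Int.land a (Int.ofNat (2 ^ 31 - 1))).toNat =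
        (Int.land b (Int.ofNat (2 ^ 31 - 1))).toNat := by
      rw [h0] at hx'
      exact (Nat.xor_eq_zero_iff.mp hx'.symm)
    rw [h31, if_pos hAB, h0]
    simp
  · have hAB : ¬ (Int.land a (Int.ofNat (2 ^ 31 - 1))).toNat =
        (Int.land b (Int.ofNat (2 ^ 31 - 1))).toNat := by
      intro h
      exact h0 (by rw [hx', h, Nat.xor_self])
    rw [h31, if_neg hAB]
    have hne : (Int.ofNat x') ≠ 0 := by
      simpa [Int.ofNat_eq_zero] using h0
    rw [if_neg hne]
    have ht : (Int.ofNat x').toNat = x' := rfl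
    rw [ht, hx']

-- ===== VERDICT (by name: the statement is the Claim_ definition above) =====
theorem f_spec : Claim_equal_f := by
  intro a b _
  unfold Spec_f
  rw [f_eq_G, f_alt_eq,
    G_eq_GN a b _ _ (fun i hi => low_bits a i hi) (fun i hi => low_bits b i hi) 31 le_rfl]
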